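-- pv_equiv track=rewrite | github.com/Albert-Hovhannisyan/Rubiks_Cube | Cube.py | swapfacesFront
-- ===== SOURCE A (Python) =====
-- def swapfacesFront(up, left, down, right, n):
--
--     for j in range(n):
--         tmp = [up[2][0], up[2][1], up[2][2]]
--
--         up[2][0] = left[2][2]
--         up[2][1] = left[1][2]
--         up[2][2] = left[0][2]
--
--         left[0][2] = down[0][0]
--         left[1][2] = down[0][1]
--         left[2][2] = down[0][2]
--
--         down[0][0] = right[2][0]
--         down[0][1] = right[1][0]
--         down[0][2] = right[0][0]
--
--         right[0][0] = tmp[0]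
--         right[1][0] = tmp[1]
--         right[2][0] = tmp[2]
--
--     return [up, left, down, right]
-- ===== SOURCE B (Python) =====
-- def swapfacesFront(up, left, down, right, n):
--     # The front move permutes 12 cells as three disjoint 4-cycles over the
--     # faces (up, left, down, right); n applications reduce to r = n % 4 rotations.
--     r = n % 4 if n > 0 else 0
--     if r:
--         faces = (up, left, down, right)
--         for cyc in (((0, 2, 0), (1, 2, 2), (2, 0, 2), (3, 0, 0)),
--                     ((0, 2, 1), (1, 1, 2), (2, 0, 1), (3, 1, 0)),
--                     ((0, 2, 2), (1, 0, 2), (2, 0, 0), (3, 2, 0))):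
--             vals = [faces[f][i][j] for f, i, j in cyc]
--             for k, (f, i, j) in enumerate(cyc):
--                 faces[f][i][j] = vals[(k + r) % 4]
--     return [up, left, down, right]
-- ===== Notes on version B (the rewrite author's own statement) =====
-- stated objective: alternative
-- what changed: Instead of executing the twelve in-place assignments n times, B reduces n to r = n % 4 (identity for n <= 0) and rotates the move's three disjoint 4-cycles of cells by r in one pass, doing constant work per call.
import Mathlib
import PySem

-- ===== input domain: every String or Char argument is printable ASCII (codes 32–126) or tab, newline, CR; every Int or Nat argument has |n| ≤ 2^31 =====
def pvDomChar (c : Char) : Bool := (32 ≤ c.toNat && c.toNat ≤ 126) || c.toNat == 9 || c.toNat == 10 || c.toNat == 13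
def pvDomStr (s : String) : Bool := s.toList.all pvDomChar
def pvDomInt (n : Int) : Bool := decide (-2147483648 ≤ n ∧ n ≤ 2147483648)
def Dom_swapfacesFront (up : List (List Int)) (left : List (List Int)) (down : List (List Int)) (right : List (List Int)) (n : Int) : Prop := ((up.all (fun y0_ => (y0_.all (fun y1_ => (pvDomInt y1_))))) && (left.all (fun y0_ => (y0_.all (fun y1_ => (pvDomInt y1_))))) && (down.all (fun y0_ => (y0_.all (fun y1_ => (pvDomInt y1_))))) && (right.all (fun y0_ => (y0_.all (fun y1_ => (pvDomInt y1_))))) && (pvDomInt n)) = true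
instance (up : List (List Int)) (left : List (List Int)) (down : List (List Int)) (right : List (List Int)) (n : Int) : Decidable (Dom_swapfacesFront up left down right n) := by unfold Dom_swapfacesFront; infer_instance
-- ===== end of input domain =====

-- B replaces A's n-fold loop of twelve in-place assignments by rotating the move's
-- three disjoint 4-cycles of cells once, by n % 4 (objective: alternative algorithm).
-- A mutates its list arguments in place; B performs the same mutation in Python,
-- and the equivalence proved here is about the RETURN value only.

-- ===== PORT A =====
-- grid read/write; exact for the in-range indices guaranteed by Pre_ whenever the loop runs
def pvGet2 (g : List (List Int)) (i j : Nat) : Int := (g.getD i []).getD j 0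
def pvSet2 (g : List (List Int)) (i j : Nat) (v : Int) : List (List Int) :=
  g.set i ((g.getD i []).set j v)

def pvQuad := List (List Int) × List (List Int) × List (List Int) × List (List Int)

-- one iteration of A's for-body, assignments in A's order
def pvStepA (s : pvQuad) : pvQuad :=
  let up := s.1; let left := s.2.1; let down := s.2.2.1; let right := s.2.2.2
  let tmp := [pvGet2 up 2 0, pvGet2 up 2 1, pvGet2 up 2 2]
  let up := pvSet2 up 2 0 (pvGet2 left 2 2)
  let up := pvSet2 up 2 1 (pvGet2 left 1 2)
  let up := pvSet2 up 2 2 (pvGet2 left 0 2)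
  let left := pvSet2 left 0 2 (pvGet2 down 0 0)
  let left := pvSet2 left 1 2 (pvGet2 down 0 1)
  let left := pvSet2 left 2 2 (pvGet2 down 0 2)
  let down := pvSet2 down 0 0 (pvGet2 right 2 0)
  let down := pvSet2 down 0 1 (pvGet2 right 1 0)
  let down := pvSet2 down 0 2 (pvGet2 right 0 0)
  let right := pvSet2 right 0 0 (tmp.getD 0 0)
  let right := pvSet2 right 1 0 (tmp.getD 1 0)
  let right := pvSet2 right 2 0 (tmp.getD 2 0)
  (up, left, down, right)

-- for j in range(n): runs max(n,0) = n.toNat times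
def pvLoopA : Nat → pvQuad → pvQuad
  | 0, s => s
  | m + 1, s => pvLoopA m (pvStepA s)

def swapfacesFront (up : List (List Int)) (left : List (List Int)) (down : List (List Int)) (right : List (List Int)) (n : Int) : List (List (List Int)) :=
  let s := pvLoopA n.toNat (up, left, down, right)
  [s.1, s.2.1, s.2.2.1, s.2.2.2]

-- ===== PORT B =====
def pvCyclesB : List (List (Nat × Nat × Nat)) :=
  [[(0, 2, 0), (1, 2, 2), (2, 0, 2), (3, 0, 0)],
   [(0, 2, 1), (1, 1, 2), (2, 0, 1), (3, 1, 0)],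
   [(0, 2, 2), (1, 0, 2), (2, 0, 0), (3, 2, 0)]]

def pvGetCell (faces : List (List (List Int))) (f i j : Nat) : Int :=
  ((faces.getD f []).getD i []).getD j 0

def pvSetCell (faces : List (List (List Int))) (f i j : Nat) (v : Int) : List (List (List Int)) :=
  faces.set f ((faces.getD f []).set i (((faces.getD f []).getD i []).set j v))

-- rotate one 4-cycle by r: cell k receives vals[(k+r) % 4]
-- (vals.getD …) is exact here: the index (k+r) % 4 is in [0,4) = range of vals
def pvApplyCycleB (r : Int) (faces : List (List (List Int))) (cyc : List (Nat × Nat × Nat)) : List (List (List Int)) :=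
  let vals := cyc.map (fun t => pvGetCell faces t.1 t.2.1 t.2.2)
  (PySem.List.enumerate cyc).foldl
    (fun fs kt => pvSetCell fs kt.2.1 kt.2.2.1 kt.2.2.2
      (vals.getD (PySem.Int.mod (kt.1 + r) 4).toNat 0)) faces

def swapfacesFront_alt (up : List (List Int)) (left : List (List Int)) (down : List (List Int)) (right : List (List Int)) (n : Int) : List (List (List Int)) :=
  let r : Int := if 0 < n then PySem.Int.mod n 4 else 0
  if r ≠ 0 then pvCyclesB.foldl (pvApplyCycleB r) [up, left, down, right]
  else [up, left, down, right]

-- ===== PRECONDITION & SPEC =====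
-- the twelve cells the move touches must exist (otherwise A raises IndexError on the first iteration)
def pvShape (up left down right : List (List Int)) : Prop :=
  3 ≤ up.length ∧ 3 ≤ (up.getD 2 []).length ∧
  3 ≤ left.length ∧ 3 ≤ (left.getD 0 []).length ∧ 3 ≤ (left.getD 1 []).length ∧ 3 ≤ (left.getD 2 []).length ∧
  1 ≤ down.length ∧ 3 ≤ (down.getD 0 []).length ∧
  3 ≤ right.length ∧ 1 ≤ (right.getD 0 []).length ∧ 1 ≤ (right.getD 1 []).length ∧ 1 ≤ (right.getD 2 []).length

-- Pre_ excludes exactly the inputs where A raises IndexError: the loop runs (n > 0) on faces missing a touched cell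
def Pre_swapfacesFront (up : List (List Int)) (left : List (List Int)) (down : List (List Int)) (right : List (List Int)) (n : Int) : Prop :=
  0 < n → pvShape up left down right
instance (up : List (List Int)) (left : List (List Int)) (down : List (List Int)) (right : List (List Int)) (n : Int) : Decidable (Pre_swapfacesFront up left down right n) := by unfold Pre_swapfacesFront pvShape; infer_instance

def pvWitness_swapfacesFront : List (List Int) × List (List Int) × List (List Int) × List (List Int) × Int :=
  ([[1,2,3],[4,5,6],[7,8,9]], [[10,11,12],[13,14,15],[16,17,18]],
   [[19,20,21],[22,23,24],[25,26,27]], [[28,29,30],[31,32,33],[34,35,36]], 1)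

def Spec_swapfacesFront (up : List (List Int)) (left : List (List Int)) (down : List (List Int)) (right : List (List Int)) (n : Int) (out : List (List (List Int))) : Prop := out = swapfacesFront_alt up left down right n
instance (up : List (List Int)) (left : List (List Int)) (down : List (List Int)) (right : List (List Int)) (n : Int) (out : List (List (List Int))) : Decidable (Spec_swapfacesFront up left down right n out) := by unfold Spec_swapfacesFront; infer_instance

-- ===== CLAIM (what is proved, stated in full; the proofs are below) =====
def Claim_equal_swapfacesFront : Prop := ∀ (up : List (List Int)) (left : List (List Int)) (down : List (List Int)) (right : List (List Int)) (n : Int), Dom_swapfacesFront up left down right n → Pre_swapfacesFront up left down right n → Spec_swapfacesFront up left down right n (swapfacesFront up left down right n)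

-- ===== LEMMAS AND PROOFS =====

-- four front moves are the identity on well-shaped faces (fully destructured form)
set_option maxHeartbeats 2000000 in
lemma pvStep4 (u0 u1 : List Int) (a b c : Int) (ct : List Int) (ut : List (List Int))
    (l00 l01 l02 : Int) (l0t : List Int) (l10 l11 l12 : Int) (l1t : List Int)
    (l20 l21 l22 : Int) (l2t : List Int) (lt : List (List Int))
    (d0 d1 d2 : Int) (d0t : List Int) (dt : List (List Int))
    (r0 : Int) (r0t : List Int) (r1 : Int) (r1t : List Int) (r2 : Int) (r2t : List Int)
    (rt : List (List Int)) :
    pvStepA (pvStepA (pvStepA (pvStepA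
      (u0 :: u1 :: (a :: b :: c :: ct) :: ut,
       (l00 :: l01 :: l02 :: l0t) :: (l10 :: l11 :: l12 :: l1t) :: (l20 :: l21 :: l22 :: l2t) :: lt,
       (d0 :: d1 :: d2 :: d0t) :: dt,
       (r0 :: r0t) :: (r1 :: r1t) :: (r2 :: r2t) :: rt)))) =
      (u0 :: u1 :: (a :: b :: c :: ct) :: ut,
       (l00 :: l01 :: l02 :: l0t) :: (l10 :: l11 :: l12 :: l1t) :: (l20 :: l21 :: l22 :: l2t) :: lt,
       (d0 :: d1 :: d2 :: d0t) :: dt,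
       (r0 :: r0t) :: (r1 :: r1t) :: (r2 :: r2t) :: rt) := rfl

lemma pvLoop_add4 (s : pvQuad) (h4 : pvStepA (pvStepA (pvStepA (pvStepA s))) = s) (m : Nat) :
    pvLoopA (m + 4) s = pvLoopA m s := by
  show pvLoopA m (pvStepA (pvStepA (pvStepA (pvStepA s)))) = pvLoopA m s
  rw [h4]

lemma pvLoop_mod (s : pvQuad) (h4 : pvStepA (pvStepA (pvStepA (pvStepA s))) = s) :
    ∀ m, pvLoopA m s = pvLoopA (m % 4) s := by
  intro m
  induction m using Nat.strong_induction_on with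
  | _ m ih =>
    by_cases hm : m < 4
    · rw [Nat.mod_eq_of_lt hm]
    · obtain ⟨k, rfl⟩ : ∃ k, m = k + 4 := ⟨m - 4, by omega⟩
      rw [pvLoop_add4 s h4 k, ih k (by omega)]
      congr 1
      omega

-- ===== VERDICT (by name: the statement is the Claim_ definition above) =====
set_option maxHeartbeats 4000000 in
theorem swapfacesFront_spec : Claim_equal_swapfacesFront := by
  intro up left down right n _hdom hpre
  unfold Spec_swapfacesFront
  by_cases hn : 0 < n
  · have hshape := hpre hn
    -- destructure every face down to the cells the move touches
    obtain ⟨hu, hu2, hl, hl0, hl1, hl2, hd, hd0, hr, hr0, hr1, hr2⟩ := hshape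
    rcases up with _ | ⟨u0, _ | ⟨u1, _ | ⟨u2, ut⟩⟩⟩ <;> simp at hu hu2
    rcases u2 with _ | ⟨a, _ | ⟨b, _ | ⟨c, ct⟩⟩⟩ <;> simp at hu2
    rcases left with _ | ⟨l0, _ | ⟨l1, _ | ⟨l2, lt⟩⟩⟩ <;> simp at hl hl0 hl1 hl2
    rcases l0 with _ | ⟨l00, _ | ⟨l01, _ | ⟨l02, l0t⟩⟩⟩ <;> simp at hl0
    rcases l1 with _ | ⟨l10, _ | ⟨l11, _ | ⟨l12, l1t⟩⟩⟩ <;> simp at hl1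
    rcases l2 with _ | ⟨l20, _ | ⟨l21, _ | ⟨l22, l2t⟩⟩⟩ <;> simp at hl2
    rcases down with _ | ⟨d0, dt⟩ <;> simp at hd hd0
    rcases d0 with _ | ⟨d00, _ | ⟨d01, _ | ⟨d02, d0t⟩⟩⟩ <;> simp at hd0
    rcases right with _ | ⟨r0, _ | ⟨r1, _ | ⟨r2, rt⟩⟩⟩ <;> simp at hr hr0 hr1 hr2
    rcases r0 with _ | ⟨r00, r0t⟩ <;> simp at hr0
    rcases r1 with _ | ⟨r10, r1t⟩ <;> simp at hr1
    rcases r2 with _ | ⟨r20, r2t⟩ <;> simp at hr2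
    have h4 := pvStep4 u0 u1 a b c ct ut l00 l01 l02 l0t l10 l11 l12 l1t l20 l21 l22 l2t lt d00 d01 d02 d0t dt r00 r0t r10 r1t r20 r2t rt
    have hmod : PySem.Int.mod n 4 = ((n.toNat % 4 : Nat) : Int) := by
      rw [PySem.Int.mod_eq_emod_of_pos (by omega : (0:Int) < 4)]
      omega
    unfold swapfacesFront
    rw [pvLoop_mod _ h4]
    have hk : n.toNat % 4 < 4 := Nat.mod_lt _ (by omega)
    set k := n.toNat % 4 with hkdef
    interval_cases k <;>
      simp only [swapfacesFront_alt, hmod, if_pos hn] <;> rfl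
  · have h0 : n.toNat = 0 := by omega
    simp [swapfacesFront, swapfacesFront_alt, h0, pvLoopA, hn]
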